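-- pv_equiv track=rewrite | github.com/gao3k/homework3 | day 131/classwork/codewars.py | sort_array
-- ===== SOURCE A (Python) =====
-- def sort_array(source_array):
--     odds = sorted([x for x in source_array if x % 2 != 0])
--     result = []
--     odd_index = 0
--     for num in source_array:
--         if num % 2 == 0:
--             result.append(num)
--         else:
--             result.append(odds[odd_index])
--             odd_index += 1
--     return result
-- ===== SOURCE B (Python) =====
-- def sort_array(source_array):
--     result = list(source_array)
--     remaining = [x for x in source_array if x % 2 != 0]
--     for i, x in enumerate(source_array):
--         if x % 2 != 0:
--             smallest = min(remaining)
--             remaining.remove(smallest)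
--             result[i] = smallest
--     return result
-- ===== Notes on version B (the rewrite author's own statement) =====
-- stated objective: alternative
-- what changed: A sorts the odd values with the library sort and replays them through the list with a consumption counter; B never sorts: it runs a selection process that at each odd slot extracts the minimum of the remaining odd values (min + remove) and writes it in place into a copy of the input.
import Mathlib
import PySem

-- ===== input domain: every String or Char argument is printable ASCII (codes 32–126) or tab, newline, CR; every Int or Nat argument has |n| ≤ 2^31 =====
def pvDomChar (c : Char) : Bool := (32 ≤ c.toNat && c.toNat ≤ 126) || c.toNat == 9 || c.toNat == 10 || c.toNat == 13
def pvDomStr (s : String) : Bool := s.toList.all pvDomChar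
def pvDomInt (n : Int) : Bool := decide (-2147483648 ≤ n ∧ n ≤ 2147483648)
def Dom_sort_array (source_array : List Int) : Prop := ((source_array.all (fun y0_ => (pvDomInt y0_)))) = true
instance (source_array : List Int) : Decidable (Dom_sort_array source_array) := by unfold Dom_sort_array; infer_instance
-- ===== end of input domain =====

-- B replaces A's library sort + counter-driven replay by a sort-free selection process:
-- at each odd slot it extracts the minimum of the remaining odd values and writes it in
-- place into a copy of the input (objective: alternative; same return value).

-- ===== PORT A =====
-- the 'for num in source_array' loop with state (result, odd_index)
def sortArrayLoopA (odds : List Int) (src : List Int) (result : List Int) (oddIdx : Int) : List Int :=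
  match src with
  | [] => result
  | num :: rest =>
    if PySem.Int.mod num 2 = 0 then
      sortArrayLoopA odds rest (result ++ [num]) oddIdx
    else
      sortArrayLoopA odds rest (result ++ [PySem.List.pyGetD odds oddIdx 0]) (oddIdx + 1)

def sort_array (source_array : List Int) : List Int :=
  let odds := PySem.List.sorted (source_array.filter (fun x => PySem.Int.mod x 2 ≠ 0)) (fun x => x) false
  sortArrayLoopA odds source_array [] 0

-- ===== PORT B =====
-- the 'for i, x in enumerate(source_array)' loop with state (remaining, result);
-- min(remaining)/remaining.remove are total here via .getD: remaining is provably
-- nonempty at every odd slot (one value per remaining odd element), so Python never raises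
def sortArrayLoopB (pairs : List (Int × Int)) (remaining : List Int) (result : List Int) : List Int :=
  match pairs with
  | [] => result
  | (i, x) :: rest =>
    if PySem.Int.mod x 2 ≠ 0 then
      let smallest := (PySem.List.min? remaining (fun y => y)).getD 0
      sortArrayLoopB rest ((PySem.List.remove? remaining smallest).getD remaining)
        (PySem.List.pySetD result i smallest)
    else
      sortArrayLoopB rest remaining result

def sort_array_alt (source_array : List Int) : List Int :=
  sortArrayLoopB (PySem.List.enumerate source_array)
    (source_array.filter (fun x => PySem.Int.mod x 2 ≠ 0)) source_array

-- ===== PRECONDITION & SPEC =====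
def Spec_sort_array (source_array : List Int) (out : List Int) : Prop := out = sort_array_alt source_array
instance (source_array : List Int) (out : List Int) : Decidable (Spec_sort_array source_array out) := by unfold Spec_sort_array; infer_instance

-- ===== CLAIM (what is proved, stated in full; the proofs are below) =====
def Claim_equal_sort_array : Prop := ∀ (source_array : List Int), Dom_sort_array source_array → Spec_sort_array source_array (sort_array source_array)

-- ===== LEMMAS AND PROOFS =====

-- common reference: walk src, keep evens, take odd replacements from vals in order
def pvMerge : List Int → List Int → List Int
  | [], _ => []
  | x :: xs, vals =>
    if PySem.Int.mod x 2 = 0 then x :: pvMerge xs vals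
    else vals.headD 0 :: pvMerge xs vals.tail

def pvOddCnt (xs : List Int) : Nat := (xs.filter (fun x => PySem.Int.mod x 2 ≠ 0)).length

def pvSortedI (vals : List Int) : List Int := PySem.List.sorted vals (fun x => x) false

theorem pvMod_two (x : Int) : PySem.Int.mod x 2 = x % 2 :=
  PySem.Int.mod_eq_emod_of_pos (by norm_num)

theorem pvOddCnt_cons_even (x : Int) (xs : List Int) (hx : PySem.Int.mod x 2 = 0) :
    pvOddCnt (x :: xs) = pvOddCnt xs := by
  have h0 : x % 2 = 0 := by rw [← pvMod_two]; exact hx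
  have h1 : ¬ (x % 2 = 1) := by omega
  have hd : (2 : Int) ∣ x := by omega
  simp [pvOddCnt, h0]

theorem pvOddCnt_cons_odd (x : Int) (xs : List Int) (hx : ¬ PySem.Int.mod x 2 = 0) :
    pvOddCnt (x :: xs) = pvOddCnt xs + 1 := by
  have h0 : ¬ x % 2 = 0 := by rw [← pvMod_two]; exact hx
  have h1 : x % 2 = 1 := by omega
  have hd : ¬ (2 : Int) ∣ x := by omega
  simp [pvOddCnt, h1]

-- sorted list of ints = its minimum followed by the sorted rest (selection-sort step)
theorem pvSorted_min_cons (vals : List Int) (m : Int)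
    (hm : PySem.List.min? vals (fun y => y) = some m) :
    pvSortedI vals = m :: pvSortedI (vals.erase m) := by
  have hmem : m ∈ vals := PySem.List.min?_mem hm
  apply PySem.List.sorted_id_eq_of_perm_of_pairwise
  · exact (List.Perm.cons m (PySem.List.sorted_perm _ _ _)).trans
      (List.perm_cons_erase hmem).symm
  · rw [List.pairwise_cons]
    refine ⟨fun y hy => ?_, ?_⟩
    · have : y ∈ vals.erase m := (PySem.List.mem_sorted _ _ _ _).1 hy
      exact PySem.List.min?_isMin hm y (List.mem_of_mem_erase this)
    · exact PySem.List.sorted_pairwise _ _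

-- B's loop over a shifted enumeration leaves the head of result alone
theorem pvLoopB_shift (xs : List Int) (s : Int) (hs : 0 ≤ s) (vals : List Int)
    (y : Int) (res : List Int) :
    sortArrayLoopB (PySem.List.enumerate xs (s + 1)) vals (y :: res)
      = y :: sortArrayLoopB (PySem.List.enumerate xs s) vals res := by
  induction xs generalizing s vals y res with
  | nil => simp [PySem.List.enumerate_nil, sortArrayLoopB]
  | cons x t ih =>
    rw [PySem.List.enumerate_cons, PySem.List.enumerate_cons]
    by_cases hx : PySem.Int.mod x 2 = 0
    · simp only [sortArrayLoopB]
      simp only [if_neg (not_not_intro hx)]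
      exact ih (s + 1) (by omega) vals y res
    · simp only [sortArrayLoopB]
      simp only [if_pos hx]
      have e1 : PySem.List.pySetD (y :: res) (s + 1)
            ((PySem.List.min? vals (fun y => y)).getD 0)
          = y :: PySem.List.pySetD res s ((PySem.List.min? vals (fun y => y)).getD 0) := by
        rw [PySem.List.pySetD_of_nonneg _ _ (by omega), PySem.List.pySetD_of_nonneg _ _ hs]
        have e2 : (s + 1).toNat = s.toNat + 1 := by omega
        simp [e2]
      rw [e1]
      exact ih (s + 1) (by omega) _ y _

-- B's loop computes pvMerge with the sorted remaining values
theorem pvLoopB_eq (xs vals : List Int) (h : vals.length = pvOddCnt xs) :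
    sortArrayLoopB (PySem.List.enumerate xs 0) vals xs = pvMerge xs (pvSortedI vals) := by
  induction xs generalizing vals with
  | nil => simp [PySem.List.enumerate_nil, sortArrayLoopB, pvMerge]
  | cons x t ih =>
    rw [PySem.List.enumerate_cons]
    by_cases hx : PySem.Int.mod x 2 = 0
    · simp only [sortArrayLoopB]
      simp only [if_neg (not_not_intro hx)]
      rw [pvLoopB_shift t 0 le_rfl vals x t,
        ih vals (by rw [h, pvOddCnt_cons_even x t hx])]
      rw [pvMerge, if_pos hx]
    · have hlen : vals.length = pvOddCnt t + 1 := by rw [h, pvOddCnt_cons_odd x t hx]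
      have hne : vals ≠ [] := by intro hv; rw [hv] at hlen; simp at hlen
      obtain ⟨m, hm⟩ : ∃ m, PySem.List.min? vals (fun y => y) = some m := by
        cases hmin : PySem.List.min? vals (fun y => y) with
        | none => exact absurd ((PySem.List.min?_eq_none_iff _ _).1 hmin) hne
        | some m => exact ⟨m, rfl⟩
      have hmem : m ∈ vals := PySem.List.min?_mem hm
      simp only [sortArrayLoopB]
      simp only [if_pos hx]
      simp only [hm, Option.getD_some]
      rw [PySem.List.remove?_eq_some_erase _ _ hmem]
      simp only [Option.getD_some]
      have e0 : PySem.List.pySetD (x :: t) 0 m = m :: t := by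
        rw [PySem.List.pySetD_of_nonneg _ _ (by omega)]; simp
      rw [e0, pvLoopB_shift t 0 le_rfl _ m t,
        ih (vals.erase m) (by rw [List.length_erase_of_mem hmem, hlen]; rfl)]
      rw [pvMerge, if_neg hx, pvSorted_min_cons vals m hm]
      simp

-- A's loop computes pvMerge on the yet-unconsumed suffix of odds
theorem pvLoopA_eq (odds : List Int) (src : List Int) (result : List Int) (i : Nat)
    (h : i + pvOddCnt src ≤ odds.length) :
    sortArrayLoopA odds src result (i : Int) = result ++ pvMerge src (odds.drop i) := by
  induction src generalizing result i with
  | nil => simp [sortArrayLoopA, pvMerge]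
  | cons num rest ih =>
    by_cases hx : PySem.Int.mod num 2 = 0
    · rw [sortArrayLoopA, if_pos hx,
        ih (result ++ [num]) i (by rw [pvOddCnt_cons_even num rest hx] at h; omega)]
      rw [pvMerge, if_pos hx]
      simp
    · have hi : i < odds.length := by rw [pvOddCnt_cons_odd num rest hx] at h; omega
      rw [sortArrayLoopA, if_neg hx]
      have e1 : (i : Int) + 1 = ((i + 1 : Nat) : Int) := by push_cast; ring
      rw [e1, ih _ (i + 1) (by rw [pvOddCnt_cons_odd num rest hx] at h; omega)]
      rw [pvMerge, if_neg hx]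
      have eg : PySem.List.pyGetD odds (i : Int) 0 = (odds.drop i).headD 0 := by
        rw [PySem.List.pyGetD_natCast]
        simp [List.getD, List.headD_eq_head?_getD, List.head?_drop]
      rw [eg, List.tail_drop]
      simp

theorem pvA_eq (src : List Int) :
    sort_array src = pvMerge src (pvSortedI (src.filter (fun x => PySem.Int.mod x 2 ≠ 0))) := by
  show sortArrayLoopA _ src [] 0 = _
  have hlen : pvOddCnt src
      ≤ (pvSortedI (src.filter (fun x => PySem.Int.mod x 2 ≠ 0))).length := by
    rw [pvSortedI, PySem.List.length_sorted]; rfl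
  have := pvLoopA_eq (pvSortedI (src.filter (fun x => PySem.Int.mod x 2 ≠ 0))) src [] 0
    (by simpa using hlen)
  simpa using this

theorem pvB_eq (src : List Int) :
    sort_array_alt src = pvMerge src (pvSortedI (src.filter (fun x => PySem.Int.mod x 2 ≠ 0))) := by
  exact pvLoopB_eq src _ rfl

-- ===== VERDICT (by name: the statement is the Claim_ definition above) =====
theorem sort_array_spec : Claim_equal_sort_array := by
  intro src _
  unfold Spec_sort_array
  rw [pvA_eq, pvB_eq]
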